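-- pv_equiv track=rewrite | github.com/Helltractor/algorithm-template | __contest__/codeforces/Codeforces Round 960 (Div. 2)/C.py | solve
-- ===== SOURCE A (Python) =====
-- def solve(n, a):
--     def f(n, a):
--         sm = sum(a)
--         b = [0] * n
--         cnt = [0] * (n + 1)
--         mad = 0
--         for i in range(n):
--             cnt[a[i]] += 1
--             if cnt[a[i]] >= 2:
--                 mad = max(mad, a[i])
--             b[i] = mad
--         return sm, b
--
--     ans = 0
--     sm, b = f(n, a)
--     ans += sm
--     sm, b = f(n, b)
--     ans += sm
--     tmp = 0
--     for i in range(n):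
--         diff = b[i] - tmp
--         c = (n - i)
--         ans += diff * c * (c + 1) // 2
--         tmp = b[i]
--     return ans
-- ===== SOURCE B (Python) =====
-- def solve(n, a):
--     def mad_transform(arr):
--         cnt = [0] * (n + 1)
--         mad = 0
--         out = []
--         for x in arr:
--             cnt[x] += 1
--             if cnt[x] >= 2:
--                 mad = max(mad, x)
--             out.append(mad)
--         return out
--
--     ans = sum(a)
--     cur = a[:n] if n > 0 else []
--     while any(cur):
--         cur = mad_transform(cur)
--         ans += sum(cur)
--     return ans
-- ===== Notes on version B (the rewrite author's own statement) =====
-- stated objective: simpler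
-- what changed: A applies the prefix-MAD transform exactly twice and then adds the remaining (shift-only) iterations via a closed-form arithmetic-series tail; B instead simulates the process directly: it adds sum(a) once and then repeatedly transforms the declared n-prefix, accumulating its sum until it is all zeros, with no closed-form arithmetic.
import Mathlib
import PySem

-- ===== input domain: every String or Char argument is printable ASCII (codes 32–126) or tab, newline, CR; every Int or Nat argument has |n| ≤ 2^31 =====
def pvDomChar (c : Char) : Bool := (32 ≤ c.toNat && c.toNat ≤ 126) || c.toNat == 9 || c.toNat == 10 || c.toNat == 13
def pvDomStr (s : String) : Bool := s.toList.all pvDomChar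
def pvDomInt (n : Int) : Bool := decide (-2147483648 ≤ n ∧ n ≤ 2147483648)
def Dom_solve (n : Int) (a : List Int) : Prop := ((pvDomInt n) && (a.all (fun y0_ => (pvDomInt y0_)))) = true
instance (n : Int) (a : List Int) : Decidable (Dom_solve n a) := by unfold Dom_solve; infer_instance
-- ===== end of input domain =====

-- B replaces A's two fixed transform applications plus closed-form arithmetic-series tail by a
-- direct simulation that re-applies the prefix-MAD transform until the array is all zeros (simpler, not faster).

-- ===== PORT A =====
-- inner helper f(n, a) of A: returns (sum(a), prefix-MAD array b)
def solveF (n : Int) (a : List Int) : Int × List Int :=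
  let sm := a.sum
  let st := (PySem.List.pyRange 0 n 1).foldl (fun (st : List Int × Int × List Int) i =>
      let ai := PySem.List.pyGetD a i 0
      let cnt1 := PySem.List.pySetD st.1 ai (PySem.List.pyGetD st.1 ai 0 + 1)
      let mad1 := if 2 ≤ PySem.List.pyGetD cnt1 ai 0 then max st.2.1 ai else st.2.1
      (cnt1, mad1, PySem.List.pySetD st.2.2 i mad1))
    (List.replicate (n + 1).toNat (0 : Int), 0, List.replicate n.toNat (0 : Int))
  (sm, st.2.2)

def solve (n : Int) (a : List Int) : Int :=
  let ans : Int := 0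
  let r1 := solveF n a
  let ans := ans + r1.1
  let r2 := solveF n r1.2
  let ans := ans + r2.1
  let st := (PySem.List.pyRange 0 n 1).foldl (fun (st : Int × Int) i =>
      let bi := PySem.List.pyGetD r2.2 i 0
      let diff := bi - st.2
      let c := n - i
      (st.1 + PySem.Int.floordiv (diff * c * (c + 1)) 2, bi)) (ans, 0)
  st.1

-- ===== PORT B =====
def madTransform (n : Int) (arr : List Int) : List Int :=
  (arr.foldl (fun (st : List Int × Int × List Int) x =>
      let cnt1 := PySem.List.pySetD st.1 x (PySem.List.pyGetD st.1 x 0 + 1)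
      let mad1 := if 2 ≤ PySem.List.pyGetD cnt1 x 0 then max st.2.1 x else st.2.1
      (cnt1, mad1, st.2.2 ++ [mad1]))
    (List.replicate (n + 1).toNat (0 : Int), 0, ([] : List Int))).2.2

-- B's `while any(cur)` loop; the fuel argument only makes the recursion total
-- (on every input admitted by Pre_solve the loop ends before the fuel runs out, as proved below)
def simLoop (n : Int) : Nat → Int → List Int → Int
  | 0, ans, _ => ans
  | fuel + 1, ans, cur =>
      if cur.any (fun x => x != 0) then
        let c2 := madTransform n cur
        simLoop n fuel (ans + c2.sum) c2
      else ans

def solve_alt (n : Int) (a : List Int) : Int :=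
  let ans := a.sum
  let cur := if 0 < n then PySem.List.slice a none (some n) else []
  simLoop n (a.length + 2) ans cur

-- ===== PRECONDITION & SPEC =====
-- Pre_solve is exactly the set of inputs on which A returns: the declared size n is at most
-- len(a), and each of the first n values indexes the count array of size n+1 without raising
-- (otherwise A raises IndexError).
def Pre_solve (n : Int) (a : List Int) : Prop :=
  n ≤ (a.length : Int) ∧ ∀ x ∈ a.take n.toNat, -(n + 1) ≤ x ∧ x ≤ n
instance (n : Int) (a : List Int) : Decidable (Pre_solve n a) := by unfold Pre_solve; infer_instance
def pvWitness_solve : Int × List Int := (3, [1, 2, 1])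

def Spec_solve (n : Int) (a : List Int) (out : Int) : Prop := out = solve_alt n a
instance (n : Int) (a : List Int) (out : Int) : Decidable (Spec_solve n a out) := by unfold Spec_solve; infer_instance

-- ===== CLAIM (what is proved, stated in full; the proofs are below) =====
def Claim_equal_solve : Prop := ∀ (n : Int) (a : List Int), Dom_solve n a → Pre_solve n a → Spec_solve n a (solve n a)

-- ===== LEMMAS AND PROOFS =====

-- the prefix-MAD transform as a structural recursion (proof-level view of both loops)
def madRec : List Int → Int → List Int → List Int
  | _, _, [] => []
  | cnt, mad, x :: s =>
    let c := PySem.List.pySetD cnt x (PySem.List.pyGetD cnt x 0 + 1)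
    let m := if 2 ≤ PySem.List.pyGetD c x 0 then max mad x else mad
    m :: madRec c m s

-- count-free view of the transform, valid on nondecreasing input (lemma madRec_eq_madPure)
def madPure : Option Int → Int → List Int → List Int
  | _, _, [] => []
  | p?, mad, x :: s =>
    let m := if p? = some x then x else mad
    m :: madPure (some x) m s

-- weighted sum Σ c[i]·(len-i): total contribution of c to all remaining iterations
def W : List Int → Int
  | [] => 0
  | x :: s => x * ((s.length : Int) + 1) + W s

-- triangular number, the exact value of A's `c*(c+1)//2`
def T (c : Int) : Int := c * (c + 1) / 2

theorem length_madRec (cnt : List Int) (mad : Int) (s : List Int) :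
    (madRec cnt mad s).length = s.length := by
  induction s generalizing cnt mad with
  | nil => rfl
  | cons x s ih => simp [madRec, ih]

theorem madRec_lb (cnt : List Int) (mad : Int) (s : List Int) :
    ∀ y ∈ madRec cnt mad s, mad ≤ y := by
  induction s generalizing cnt mad with
  | nil => simp [madRec]
  | cons x s ih =>
    intro y hy
    simp only [madRec, List.mem_cons] at hy
    rcases hy with h | h
    · subst h; split <;> simp
    · have := ih _ _ _ h
      have h2 : mad ≤ (if 2 ≤ PySem.List.pyGetD (PySem.List.pySetD cnt x (PySem.List.pyGetD cnt x 0 + 1)) x 0 then max mad x else mad) := by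
        split <;> simp
      exact le_trans h2 this

theorem madRec_mem (cnt : List Int) (mad : Int) (s : List Int) :
    ∀ y ∈ madRec cnt mad s, y = mad ∨ y ∈ s := by
  induction s generalizing cnt mad with
  | nil => simp [madRec]
  | cons x s ih =>
    intro y hy
    simp only [madRec, List.mem_cons] at hy
    rcases hy with h | h
    · subst h
      split
      · rcases max_choice mad x with h | h <;> simp [h]
      · left; rfl
    · rcases ih _ _ _ h with h2 | h2
      · revert h2; split
        · intro h2; subst h2
          rcases max_choice mad x with h | h <;> simp [h]
        · intro h2; simp [h2]
      · simp [h2]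

theorem madRec_pairwise (cnt : List Int) (mad : Int) (s : List Int) :
    (madRec cnt mad s).Pairwise (· ≤ ·) := by
  induction s generalizing cnt mad with
  | nil => simp [madRec]
  | cons x s ih =>
    simp only [madRec, List.pairwise_cons]
    exact ⟨fun y hy => madRec_lb _ _ _ y hy, ih _ _⟩

theorem shift_aux (b : List Int) : ∀ (iprev imad oprev omad : Int),
    imad = oprev → (omad = oprev ∨ oprev = iprev) →
    madPure (some oprev) omad (madPure (some iprev) imad b) =
      (oprev :: madPure (some iprev) imad b).dropLast := by
  induction b with
  | nil => intro _ _ _ _ _ _; rfl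
  | cons x b ih =>
    intro iprev imad oprev omad h1 h2
    simp only [madPure]
    by_cases hx : iprev = x
    · rw [if_pos (by rw [hx] : (some iprev : Option Int) = some x)]
      by_cases he : imad = iprev
      · have hox : oprev = x := by omega
        rw [if_pos (by rw [hox] : (some oprev : Option Int) = some x)]
        rw [List.dropLast_cons₂, hox]
        exact congrArg _ (ih x x x x rfl (Or.inl rfl))
      · have hne : ¬ ((some oprev : Option Int) = some x) := by simp; omega
        rw [if_neg hne]
        have homad : omad = oprev := by rcases h2 with h | h; exacts [h, by omega]
        rw [List.dropLast_cons₂, homad]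
        exact congrArg _ (ih x x x oprev rfl (Or.inr rfl))
    · rw [if_neg (by simp only [Option.some.injEq]; exact hx : ¬ ((some iprev : Option Int) = some x))]
      rw [if_pos (by rw [h1] : (some oprev : Option Int) = some imad)]
      rw [List.dropLast_cons₂, ← h1]
      exact congrArg _ (ih x imad imad imad rfl (Or.inl rfl))

theorem shift_top (b : List Int) (h : b ≠ []) :
    madPure none 0 (madPure none 0 b) = (0 :: madPure none 0 b).dropLast := by
  match b with
  | x :: b =>
    simp only [madPure]
    rw [if_neg (by simp : ¬ ((none : Option Int) = some x))]
    rw [if_neg (by simp : ¬ ((none : Option Int) = some 0))]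
    rw [List.dropLast_cons₂]
    exact congrArg _ (shift_aux b x 0 0 0 rfl (Or.inl rfl))
theorem W_zero (c : List Int) (h : ∀ y ∈ c, y = 0) : W c = 0 := by
  induction c with
  | nil => rfl
  | cons x s ih =>
    have hx := h x (by simp)
    simp [W, hx, ih (fun y hy => h y (List.mem_cons_of_mem _ hy))]

theorem W_dropLast (c : List Int) : W c = c.sum + W c.dropLast := by
  induction c with
  | nil => rfl
  | cons x s ih =>
    cases s with
    | nil => simp [W]
    | cons y t =>
      rw [List.dropLast_cons₂]
      simp only [W, List.sum_cons] at *
      rw [List.length_dropLast]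
      push_cast [List.length_cons]
      linarith

theorem fdiv_T (diff c : Int) :
    PySem.Int.floordiv (diff * c * (c + 1)) 2 = diff * T c := by
  rw [PySem.Int.floordiv_eq_ediv_of_pos (by norm_num)]
  unfold T
  rw [mul_assoc, Int.mul_ediv_assoc]
  exact (Int.even_mul_succ_self c).two_dvd

theorem T_diff (c : Int) : T c - T (c - 1) = c := by
  have h1 : T c * 2 = c * (c + 1) := Int.ediv_mul_cancel (Int.even_mul_succ_self c).two_dvd
  have h2 : T (c - 1) * 2 = (c - 1) * (c - 1 + 1) :=
    Int.ediv_mul_cancel (Int.even_mul_succ_self (c - 1)).two_dvd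
  have h3 : c * (c + 1) - (c - 1) * (c - 1 + 1) = 2 * c := by ring
  linarith

theorem pgset_self (cnt : List Int) (x v : Int) (h0 : 0 ≤ x) (h1 : x < (cnt.length : Int)) :
    PySem.List.pyGetD (PySem.List.pySetD cnt x v) x 0 = v := by
  rw [PySem.List.pySetD_of_nonneg cnt v h0,
      PySem.List.pyGetD_eq_getElem _ _ h0 (by simpa using h1)]
  exact List.getElem_set_self _

theorem pgset_ne (cnt : List Int) (x y v : Int) (h0 : 0 ≤ x) (h1 : x < (cnt.length : Int))
    (h2 : 0 ≤ y) (h3 : y < (cnt.length : Int)) (hne : y ≠ x) :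
    PySem.List.pyGetD (PySem.List.pySetD cnt x v) y 0 = PySem.List.pyGetD cnt y 0 := by
  rw [PySem.List.pySetD_of_nonneg cnt v h0,
      PySem.List.pyGetD_eq_getElem _ _ h2 (by simpa using h3),
      PySem.List.pyGetD_eq_getElem _ _ h2 h3]
  rw [List.getElem_set]
  rw [if_neg (by omega)]

theorem mem_le_getLast : ∀ (p : List Int), p.Pairwise (· ≤ ·) → ∀ x ∈ p,
    ∃ l, p.getLast? = some l ∧ x ≤ l ∧ l ∈ p := by
  intro p
  induction p with
  | nil => intro _ x hx; cases hx
  | cons a t ih =>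
    intro hp x hx
    cases t with
    | nil => simp at hx; exact ⟨a, by simp [hx]⟩
    | cons b t2 =>
      rw [List.getLast?_cons_cons]
      rw [List.pairwise_cons] at hp
      rcases List.mem_cons.mp hx with h | h
      · obtain ⟨l, hl1, hl2, hl3⟩ := ih hp.2 b (by simp)
        exact ⟨l, hl1, by subst h; exact hp.1 l hl3, List.mem_cons_of_mem _ hl3⟩
      · obtain ⟨l, hl1, hl2, hl3⟩ := ih hp.2 x h
        exact ⟨l, hl1, hl2, List.mem_cons_of_mem _ hl3⟩

theorem madRec_eq_madPure (s : List Int) : ∀ (p cnt : List Int) (mad : Int),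
    (∀ x : Int, 0 ≤ x → x < (cnt.length : Int) → PySem.List.pyGetD cnt x 0 = (p.count x : Int)) →
    (∀ x ∈ s, 0 ≤ x ∧ x < (cnt.length : Int)) →
    (∀ x ∈ p, ∀ y ∈ s, x ≤ y) →
    s.Pairwise (· ≤ ·) →
    p.Pairwise (· ≤ ·) →
    (∀ y ∈ s, mad ≤ y) →
    madRec cnt mad s = madPure p.getLast? mad s := by
  induction s with
  | nil => intro _ _ _ _ _ _ _ _ _; rfl
  | cons x s ih =>
    intro p cnt mad hc hr hord hs hp hm
    obtain ⟨hx0, hxl⟩ := hr x (by simp)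
    have hsp := (List.pairwise_cons.mp hs)
    have hcx : PySem.List.pyGetD (PySem.List.pySetD cnt x (PySem.List.pyGetD cnt x 0 + 1)) x 0
        = (p.count x : Int) + 1 := by
      rw [pgset_self cnt x _ hx0 hxl, hc x hx0 hxl]
    have hmemiff : x ∈ p ↔ p.getLast? = some x := by
      constructor
      · intro hmem
        obtain ⟨l, hl1, hl2, hl3⟩ := mem_le_getLast p hp x hmem
        have h4 : l ≤ x := hord l hl3 x (by simp)
        have h5 : l = x := by omega
        rw [← h5]; exact hl1
      · intro hlast
        exact List.mem_of_getLast? hlast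
    have hcond : (2 ≤ (p.count x : Int) + 1) ↔ (p.getLast? = some x) := by
      rw [← hmemiff]
      constructor
      · intro h; exact List.count_pos_iff.mp (by omega)
      · intro h; have := List.count_pos_iff.mpr h; omega
    have hc' : ∀ y : Int, 0 ≤ y →
        y < (((PySem.List.pySetD cnt x (PySem.List.pyGetD cnt x 0 + 1)).length : Nat) : Int) →
        PySem.List.pyGetD (PySem.List.pySetD cnt x (PySem.List.pyGetD cnt x 0 + 1)) y 0
          = ((p ++ [x]).count y : Int) := by
      intro y hy0 hyl
      rw [PySem.List.length_pySetD] at hyl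
      by_cases hyx : y = x
      · subst hyx
        rw [pgset_self cnt y _ hy0 hyl, hc y hy0 hyl, List.count_append]
        simp
      · rw [pgset_ne cnt x y _ hx0 hxl hy0 hyl hyx, hc y hy0 hyl]
        have hcnt0 : (p ++ [x]).count y = p.count y := by
          rw [List.count_append]
          simp [Ne.symm hyx]
        rw [hcnt0]
    have hr' : ∀ y ∈ s, 0 ≤ y ∧
        y < (((PySem.List.pySetD cnt x (PySem.List.pyGetD cnt x 0 + 1)).length : Nat) : Int) := by
      intro y hy
      have := hr y (List.mem_cons_of_mem _ hy)
      rwa [PySem.List.length_pySetD]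
    have hord' : ∀ z ∈ p ++ [x], ∀ y ∈ s, z ≤ y := by
      intro z hz y hy
      rcases List.mem_append.mp hz with h | h
      · exact hord z h y (List.mem_cons_of_mem _ hy)
      · simp at h; rw [h]; exact hsp.1 y hy
    have hp' : (p ++ [x]).Pairwise (· ≤ ·) := by
      rw [List.pairwise_append]
      refine ⟨hp, List.pairwise_singleton _ _, ?_⟩
      intro z hz w hw
      simp at hw
      rw [hw]
      exact hord z hz x (by simp)
    simp only [madRec, madPure, hcx]
    by_cases hmem : p.getLast? = some x
    · rw [if_pos (by rw [hcond]; exact hmem), if_pos hmem]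
      have hmax : max mad x = x := max_eq_right (hm x (by simp))
      rw [hmax]
      have hrec := ih (p ++ [x]) (PySem.List.pySetD cnt x (PySem.List.pyGetD cnt x 0 + 1)) x
        hc' hr' hord' hsp.2 hp' (fun y hy => hsp.1 y hy)
      rw [hrec, List.getLast?_concat]
    · rw [if_neg (by rw [hcond]; exact hmem), if_neg hmem]
      have hrec := ih (p ++ [x]) (PySem.List.pySetD cnt x (PySem.List.pyGetD cnt x 0 + 1)) mad
        hc' hr' hord' hsp.2 hp' (fun y hy => hm y (List.mem_cons_of_mem _ hy))
      rw [hrec, List.getLast?_concat]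

theorem countNZ_shift (c : List Int) (hp : c.Pairwise (· ≤ ·)) (h0 : ∀ y ∈ c, 0 ≤ y)
    (hA : c.any (fun x => x != 0) = true) :
    ((0 :: c).dropLast).countP (fun x => x != 0) < c.countP (fun x => x != 0) := by
  rcases List.eq_nil_or_concat c with rfl | ⟨t, z, hc⟩
  · simp at hA
  · subst hc
    simp only [List.concat_eq_append] at hp h0 hA ⊢
    have hz : z ≠ 0 := by
      simp only [List.any_eq_true] at hA
      obtain ⟨y, hy, hynz⟩ := hA
      simp only [bne_iff_ne, ne_eq] at hynz
      rcases List.mem_append.mp hy with h | h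
      · have hyz : y ≤ z := by
          rw [List.pairwise_append] at hp
          exact hp.2.2 y h z (by simp)
        have := h0 y (List.mem_append_left _ h)
        omega
      · simp at h; omega
    have e1 : (0 :: (t ++ [z])).dropLast = 0 :: t := by
      rw [← List.cons_append, List.dropLast_concat]
    rw [e1]
    simp only [List.countP_cons, List.countP_append]
    norm_num [hz]

theorem take_set_succ (l : List Int) (k : Nat) (v : Int) (h : k < l.length) :
    (l.set k v).take (k + 1) = l.take k ++ [v] := by
  rw [List.take_set, List.take_add_one]
  have hlk : l[k]? = some l[k] := List.getElem?_eq_getElem h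
  rw [hlk]
  have hlen : (l.take k).length = k := by simp [List.length_take]; omega
  rw [List.set_append]
  rw [if_neg (by omega)]
  simp [hlen]

theorem foldB (s : List Int) : ∀ (cnt : List Int) (mad : Int) (acc : List Int),
    (s.foldl (fun (st : List Int × Int × List Int) x =>
      let cnt1 := PySem.List.pySetD st.1 x (PySem.List.pyGetD st.1 x 0 + 1)
      let mad1 := if 2 ≤ PySem.List.pyGetD cnt1 x 0 then max st.2.1 x else st.2.1
      (cnt1, mad1, st.2.2 ++ [mad1])) (cnt, mad, acc)).2.2 = acc ++ madRec cnt mad s := by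
  induction s with
  | nil => intro cnt mad acc; simp [madRec]
  | cons x s ih =>
    intro cnt mad acc
    simp only [List.foldl_cons]
    rw [ih]
    simp [madRec]

theorem foldA (a : List Int) (N : Nat) (hN : N ≤ a.length) : ∀ (m k : Nat), k + m = N →
    ∀ (cnt : List Int) (mad : Int) (b : List Int), b.length = N →
    ((PySem.List.pyRange (k : Int) (N : Int) 1).foldl (fun (st : List Int × Int × List Int) i =>
      let ai := PySem.List.pyGetD a i 0
      let cnt1 := PySem.List.pySetD st.1 ai (PySem.List.pyGetD st.1 ai 0 + 1)
      let mad1 := if 2 ≤ PySem.List.pyGetD cnt1 ai 0 then max st.2.1 ai else st.2.1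
      (cnt1, mad1, PySem.List.pySetD st.2.2 i mad1)) (cnt, mad, b)).2.2
      = b.take k ++ madRec cnt mad ((a.take N).drop k) := by
  intro m
  induction m with
  | zero =>
    intro k hk cnt mad b hb
    have hkl : k = N := by omega
    rw [PySem.List.pyRange_one_eq_nil (by omega)]
    subst hkl
    rw [List.drop_eq_nil_of_le (by simp)]
    simp [madRec, ← hb]
  | succ m ih =>
    intro k hk cnt mad b hb
    have hkl : k < N := by omega
    have hka : k < a.length := by omega
    rw [PySem.List.pyRange_one_cons (by omega)]
    simp only [List.foldl_cons]
    have hget : PySem.List.pyGetD a (k : Int) 0 = a[k] := by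
      rw [PySem.List.pyGetD_natCast]
      exact List.getD_eq_getElem a 0 hka
    have hcast : ((k : Int) + 1) = (((k + 1 : Nat)) : Int) := by push_cast; ring
    rw [hget, hcast]
    rw [PySem.List.pySetD_natCast]
    rw [ih (k + 1) (by omega) _ _ _ (by simpa using hb)]
    have hkt : k < (a.take N).length := by simp; omega
    rw [List.drop_eq_getElem_cons hkt]
    have hgt : (a.take N)[k] = a[k] := List.getElem_take
    rw [hgt]
    simp only [madRec]
    rw [take_set_succ b k _ (by omega)]
    simp

theorem T_zero : T 0 = 0 := rfl

theorem solveF_eq (n : Int) (a : List Int) (h : n ≤ (a.length : Int)) :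
    solveF n a = (a.sum, madRec (List.replicate (n + 1).toNat 0) 0 (a.take n.toNat)) := by
  by_cases hpos : 0 ≤ n
  · have hN : n.toNat ≤ a.length := by omega
    have key := foldA a n.toNat hN n.toNat 0 (by omega)
      (List.replicate (n + 1).toNat 0) 0 (List.replicate n.toNat 0) (by simp)
    rw [Nat.cast_zero] at key
    simp only [List.take_zero, List.drop_zero, List.nil_append] at key
    have hr : PySem.List.pyRange 0 n 1 = PySem.List.pyRange 0 ((n.toNat : Nat) : Int) 1 := by
      rw [Int.toNat_of_nonneg hpos]
    unfold solveF
    rw [hr]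
    exact congrArg (fun t => (a.sum, t)) key
  · have h0 : n.toNat = 0 := by omega
    unfold solveF
    rw [PySem.List.pyRange_one_eq_nil (by omega)]
    simp [h0, madRec]

theorem tailFold (b : List Int) (n : Int) (hn : n = (b.length : Int)) (r2 : Int × List Int)
    (hr : r2.2 = b) :
    ∀ (m k : Nat), k + m = b.length → ∀ (ans tmp : Int),
    ((PySem.List.pyRange (k : Int) n 1).foldl (fun (st : Int × Int) i =>
      let bi := PySem.List.pyGetD r2.2 i 0
      let diff := bi - st.2
      let c := n - i
      (st.1 + PySem.Int.floordiv (diff * c * (c + 1)) 2, bi)) (ans, tmp)).1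
      = ans - tmp * T (n - k) + W (b.drop k) := by
  subst hr
  intro m
  induction m with
  | zero =>
    intro k hk ans tmp
    have hkl : k = r2.2.length := by omega
    rw [PySem.List.pyRange_one_eq_nil (by omega)]
    subst hkl
    rw [List.drop_length]
    have : n - (r2.2.length : Int) = 0 := by omega
    rw [this, T_zero]
    simp [W]
  | succ m ih =>
    intro k hk ans tmp
    have hkl : k < r2.2.length := by omega
    rw [PySem.List.pyRange_one_cons (by omega)]
    simp only [List.foldl_cons]
    have hget : PySem.List.pyGetD r2.2 (k : Int) 0 = r2.2[k] := by
      rw [PySem.List.pyGetD_natCast]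
      exact List.getD_eq_getElem r2.2 0 hkl
    have hcast : ((k : Int) + 1) = (((k + 1 : Nat)) : Int) := by push_cast; ring
    rw [hget, hcast]
    rw [ih (k + 1) (by omega) _ _]
    rw [List.drop_eq_getElem_cons hkl]
    rw [fdiv_T]
    have hW : W (r2.2[k] :: r2.2.drop (k + 1)) =
        r2.2[k] * (((r2.2.drop (k + 1)).length : Int) + 1) + W (r2.2.drop (k + 1)) := rfl
    rw [hW]
    have hTd : T (n - k) - T (n - (k + 1 : Nat)) = n - k := by
      have := T_diff (n - k)
      have he : n - ((k + 1 : Nat) : Int) = (n - k) - 1 := by push_cast; ring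
      rw [he]
      omega
    have hlen : ((r2.2.drop (k + 1)).length : Int) + 1 = n - k := by
      rw [List.length_drop]; omega
    rw [hlen]
    have hT1 : T (n - ((k + 1 : Nat) : Int)) = T (n - k) - (n - k) := by omega
    rw [hT1]
    ring

theorem madTransform_eq (n : Int) (arr : List Int) :
    madTransform n arr = madRec (List.replicate (n + 1).toNat 0) 0 arr := by
  unfold madTransform
  rw [foldB]
  simp

theorem madPure_of_madRec (n : Int) (hn : 0 ≤ n) (c : List Int)
    (hb : ∀ y ∈ c, 0 ≤ y ∧ y ≤ n) (hpc : c.Pairwise (· ≤ ·)) :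
    madRec (List.replicate (n + 1).toNat 0) 0 c = madPure none 0 c := by
  have h := madRec_eq_madPure c [] (List.replicate (n + 1).toNat 0) 0
    (by intro x hx0 hxl
        rw [PySem.List.pyGetD_of_nonneg _ _ hx0]
        rw [List.getD_replicate 0 (by simp at hxl ⊢; omega)]
        simp)
    (by intro x hx
        have := hb x hx
        constructor
        · omega
        · simp only [List.length_replicate]
          omega)
    (by intro x hx; cases hx)
    hpc
    (List.Pairwise.nil)
    (by intro y hy; exact (hb y hy).1)
  exact h

theorem sim_eq (n : Int) (hn : 0 ≤ n) : ∀ (fuel : Nat) (c : List Int) (ans : Int),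
    (∃ d : List Int, d ≠ [] ∧ c = madPure none 0 d) →
    c.Pairwise (· ≤ ·) → (∀ y ∈ c, 0 ≤ y ∧ y ≤ n) →
    c.countP (fun x => x != 0) ≤ fuel →
    simLoop n fuel ans c = ans + (W c - c.sum) := by
  intro fuel
  induction fuel with
  | zero =>
    intro c ans _ _ _ hcount
    have h0 : c.countP (fun x => x != 0) = 0 := by omega
    have hall : ∀ y ∈ c, y = 0 := by
      have hz := List.countP_eq_zero.mp h0
      intro y hy
      have := hz y hy
      simpa using this
    simp [simLoop, W_zero c hall, List.sum_eq_zero hall]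
  | succ fuel ih =>
    intro c ans hd hp hb hcount
    obtain ⟨d, hdne, hcd⟩ := hd
    by_cases hA : c.any (fun x => x != 0) = true
    · have hne : c ≠ [] := by rintro rfl; simp at hA
      have hPure : madPure none 0 c = (0 :: c).dropLast := by
        rw [hcd, shift_top d hdne, ← hcd]
      have hshift : madTransform n c = (0 :: c).dropLast := by
        rw [madTransform_eq, madPure_of_madRec n hn c hb hp, hPure]
      rw [simLoop, if_pos hA]
      simp only [hshift]
      have hdl : (0 :: c).dropLast = 0 :: c.dropLast := List.dropLast_cons_of_ne_nil hne
      have hrec := ih ((0 :: c).dropLast) (ans + ((0 :: c).dropLast).sum)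
        ⟨c, hne, hPure.symm⟩
        (by rw [hdl]
            rw [List.pairwise_cons]
            refine ⟨fun y hy => (hb y (List.mem_of_mem_dropLast hy)).1,
              hp.sublist (List.dropLast_sublist c)⟩)
        (by intro y hy
            rw [hdl] at hy
            rcases List.mem_cons.mp hy with h | h
            · subst h; omega
            · exact hb y (List.mem_of_mem_dropLast h))
        (by have := countNZ_shift c hp (fun y hy => (hb y hy).1) hA
            omega)
      rw [hrec]
      have hW := W_dropLast c
      have hW2 : W ((0 :: c).dropLast) = W c.dropLast := by
        rw [hdl]; simp [W]
      rw [hW2]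
      omega
    · rw [simLoop, if_neg (by simpa using hA)]
      have hall : ∀ y ∈ c, y = 0 := by
        intro y hy
        by_contra hne
        exact hA (List.any_eq_true.mpr ⟨y, hy, by simpa using hne⟩)
      rw [W_zero c hall, List.sum_eq_zero hall]
      ring

-- ===== VERDICT (by name: the statement is the Claim_ definition above) =====
theorem solve_spec : Claim_equal_solve := by
  intro n a _hdom hpre
  obtain ⟨h1, hbound⟩ := hpre
  unfold Spec_solve
  have hf2 : a.length + 2 = (a.length + 1) + 1 := rfl
  by_cases hcase : 0 < n
  · -- 0 < n ≤ len a
    have hn0 : 0 ≤ n := by omega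
    have hN : n.toNat ≤ a.length := by omega
    have hplen : (a.take n.toNat).length = n.toNat := by simp; omega
    have e1 := solveF_eq n a h1
    have hb1len : (madRec (List.replicate (n + 1).toNat 0) 0 (a.take n.toNat)).length = n.toNat := by
      rw [length_madRec, hplen]
    have e2 := solveF_eq n (madRec (List.replicate (n + 1).toNat 0) 0 (a.take n.toNat))
      (by rw [hb1len]; omega)
    rw [List.take_of_length_le (le_of_eq hb1len)] at e2
    -- bounds
    have hb1b : ∀ y ∈ madRec (List.replicate (n + 1).toNat 0) 0 (a.take n.toNat), 0 ≤ y ∧ y ≤ n := by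
      intro y hy
      refine ⟨madRec_lb _ _ _ y hy, ?_⟩
      rcases madRec_mem _ _ _ y hy with h | h
      · omega
      · exact (hbound y h).2
    have hb2b : ∀ y ∈ madRec (List.replicate (n + 1).toNat 0) 0
        (madRec (List.replicate (n + 1).toNat 0) 0 (a.take n.toNat)), 0 ≤ y ∧ y ≤ n := by
      intro y hy
      refine ⟨madRec_lb _ _ _ y hy, ?_⟩
      rcases madRec_mem _ _ _ y hy with h | h
      · omega
      · exact (hb1b y h).2
    -- value of A
    have hAval : solve n a = a.sum + (madRec (List.replicate (n + 1).toNat 0) 0 (a.take n.toNat)).sum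
        + W (madRec (List.replicate (n + 1).toNat 0) 0
              (madRec (List.replicate (n + 1).toNat 0) 0 (a.take n.toNat))) := by
      unfold solve
      simp only [e1]
      simp only [e2]
      have ht := tailFold
        (madRec (List.replicate (n + 1).toNat 0) 0
          (madRec (List.replicate (n + 1).toNat 0) 0 (a.take n.toNat)))
        n
        (by rw [length_madRec, hb1len]; omega)
        ((madRec (List.replicate (n + 1).toNat 0) 0 (a.take n.toNat)).sum,
          madRec (List.replicate (n + 1).toNat 0) 0
            (madRec (List.replicate (n + 1).toNat 0) 0 (a.take n.toNat)))
        rfl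
        (madRec (List.replicate (n + 1).toNat 0) 0
          (madRec (List.replicate (n + 1).toNat 0) 0 (a.take n.toNat))).length
        0 (by omega)
        (0 + a.sum + (madRec (List.replicate (n + 1).toNat 0) 0 (a.take n.toNat)).sum) 0
      rw [Nat.cast_zero] at ht
      simp only [List.drop_zero, sub_zero, zero_mul, T] at ht
      simp only [ht]
      ring
    -- value of B
    unfold solve_alt
    rw [if_pos hcase, PySem.List.slice_to a hn0, hf2, hAval]
    rw [simLoop]
    by_cases hA1 : (a.take n.toNat).any (fun x => x != 0) = true
    · rw [if_pos hA1]
      simp only [madTransform_eq n (a.take n.toNat)]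
      rw [simLoop]
      by_cases hA2 : (madRec (List.replicate (n + 1).toNat 0) 0 (a.take n.toNat)).any
          (fun x => x != 0) = true
      · rw [if_pos hA2]
        simp only [madTransform_eq n]
        have hb1ne : madRec (List.replicate (n + 1).toNat 0) 0 (a.take n.toNat) ≠ [] := by
          intro hcon; rw [hcon] at hA2; simp at hA2
        have hPure := madPure_of_madRec n hn0 (madRec (List.replicate (n + 1).toNat 0) 0 (a.take n.toNat))
          hb1b (madRec_pairwise _ _ _)
        have hs := sim_eq n hn0 a.length
          (madRec (List.replicate (n + 1).toNat 0) 0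
            (madRec (List.replicate (n + 1).toNat 0) 0 (a.take n.toNat)))
          (a.sum + (madRec (List.replicate (n + 1).toNat 0) 0 (a.take n.toNat)).sum
            + (madRec (List.replicate (n + 1).toNat 0) 0
                (madRec (List.replicate (n + 1).toNat 0) 0 (a.take n.toNat))).sum)
          ⟨madRec (List.replicate (n + 1).toNat 0) 0 (a.take n.toNat), hb1ne, hPure⟩
          (madRec_pairwise _ _ _) hb2b
          (by
            have hc1 := List.countP_le_length (l := madRec (List.replicate (n + 1).toNat 0) 0
              (madRec (List.replicate (n + 1).toNat 0) 0 (a.take n.toNat))) (p := fun x => x != 0)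
            rw [length_madRec, hb1len] at hc1
            omega)
        rw [hs]
        ring
      · rw [if_neg (by simpa using hA2)]
        have hz1 : ∀ y ∈ madRec (List.replicate (n + 1).toNat 0) 0 (a.take n.toNat), y = 0 := by
          intro y hy
          by_contra hne
          exact hA2 (List.any_eq_true.mpr ⟨y, hy, by simpa using hne⟩)
        have hz2 : ∀ y ∈ madRec (List.replicate (n + 1).toNat 0) 0
            (madRec (List.replicate (n + 1).toNat 0) 0 (a.take n.toNat)), y = 0 := by
          intro y hy
          rcases madRec_mem _ _ _ y hy with h | h
          · exact h
          · exact hz1 y h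
        rw [List.sum_eq_zero hz1, W_zero _ hz2]
        ring
    · rw [if_neg (by simpa using hA1)]
      have hz0 : ∀ y ∈ a.take n.toNat, y = 0 := by
        intro y hy
        by_contra hne
        exact hA1 (List.any_eq_true.mpr ⟨y, hy, by simpa using hne⟩)
      have hz1 : ∀ y ∈ madRec (List.replicate (n + 1).toNat 0) 0 (a.take n.toNat), y = 0 := by
        intro y hy
        rcases madRec_mem _ _ _ y hy with h | h
        · exact h
        · exact hz0 y h
      have hz2 : ∀ y ∈ madRec (List.replicate (n + 1).toNat 0) 0
          (madRec (List.replicate (n + 1).toNat 0) 0 (a.take n.toNat)), y = 0 := by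
        intro y hy
        rcases madRec_mem _ _ _ y hy with h | h
        · exact h
        · exact hz1 y h
      rw [List.sum_eq_zero hz1, W_zero _ hz2]
      ring
  · -- n ≤ 0: A returns sum(a); B simulates the empty prefix
    have hp0 : n.toNat = 0 := Int.toNat_of_nonpos (by omega)
    have e1 := solveF_eq n a h1
    rw [hp0] at e1
    simp only [List.take_zero] at e1
    have em : madRec (List.replicate (n + 1).toNat 0) 0 ([] : List Int) = [] := rfl
    rw [em] at e1
    have e2 := solveF_eq n ([] : List Int) (by simp; omega)
    rw [hp0] at e2
    simp only [List.take_nil] at e2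
    rw [em] at e2
    unfold solve solve_alt
    rw [PySem.List.pyRange_one_eq_nil (by omega)]
    simp only [e1, e2, List.foldl_nil, List.sum_nil]
    rw [if_neg (by omega), hf2, simLoop]
    simp
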